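-- pv_equiv track=rewrite | github.com/dragneel786/leetcode_practise | 3774-absolute-difference-between-maximum-and-minimum-k-elements/3774-absolute-difference-between-maximum-and-minimum-k-elements.py | absDifference
-- ===== SOURCE A (Python) =====
-- from typing import List
--
-- def absDifference(nums: List[int], k: int) -> int:
--     nums.sort()
--     n = len(nums)
--     sums = suml = 0
--     for i in range(k):
--         sums += nums[i]
--         suml += nums[n - i - 1]
--
--     return suml - sums
-- ===== SOURCE B (Python) =====
-- from typing import List
--
-- def absDifference(nums: List[int], k: int) -> int:
--     # quickselect-style partial selection: no full sort; does not mutate nums (A sorts it in place)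
--     def small_sum(xs, m):
--         # sum of the m smallest elements of xs (all if m >= len(xs), 0 if m <= 0)
--         if m <= 0 or not xs:
--             return 0
--         p = xs[len(xs) // 2]
--         lt = [x for x in xs if x < p]
--         eq = [x for x in xs if x == p]
--         gt = [x for x in xs if x > p]
--         if m <= len(lt):
--             return small_sum(lt, m)
--         if m <= len(lt) + len(eq):
--             return sum(lt) + p * (m - len(lt))
--         return sum(lt) + p * len(eq) + small_sum(gt, m - len(lt) - len(eq))
--
--     n = len(nums)
--     total = sum(nums)
--     return total - small_sum(nums, n - k) - small_sum(nums, k)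
-- ===== Notes on version B (the rewrite author's own statement) =====
-- stated objective: alternative
-- what changed: Replaces sort-then-index-loop with a recursive quickselect-style three-way partition that sums the k smallest (and, via the total, the k largest) without fully sorting; B also does not mutate nums (A sorts it in place).
import Mathlib
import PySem

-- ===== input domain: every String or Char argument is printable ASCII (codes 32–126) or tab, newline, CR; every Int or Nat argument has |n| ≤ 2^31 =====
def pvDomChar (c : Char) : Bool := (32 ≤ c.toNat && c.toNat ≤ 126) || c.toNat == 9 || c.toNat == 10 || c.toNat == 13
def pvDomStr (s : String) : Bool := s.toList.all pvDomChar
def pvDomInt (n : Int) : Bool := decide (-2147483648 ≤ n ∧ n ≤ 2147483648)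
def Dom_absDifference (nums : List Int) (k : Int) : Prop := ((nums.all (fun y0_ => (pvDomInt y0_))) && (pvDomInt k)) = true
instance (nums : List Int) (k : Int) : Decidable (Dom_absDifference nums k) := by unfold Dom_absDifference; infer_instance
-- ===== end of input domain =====

-- B replaces A's full sort with a quickselect-style three-way partition (alternative algorithm);
-- equivalence is about the RETURN value only: A sorts nums in place, B does not mutate it.

-- ===== PORT A =====
-- nums.sort(); loop over range(k) accumulating sums (prefix) and suml (suffix); return suml - sums.
def absDifference (nums : List Int) (k : Int) : Int :=
  let s := PySem.List.sorted nums (fun x => x) false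
  let n : Int := (s.length : Int)
  let r := (PySem.List.pyRange 0 k).foldl
    (fun (acc : Int × Int) i =>
      (acc.1 + PySem.List.pyGetD s i 0, acc.2 + PySem.List.pyGetD s (n - i - 1) 0)) (0, 0)
  r.2 - r.1

-- ===== PORT B =====
-- helper lemmas cited by smallSum's decreasing_by
theorem pv_filter_length_lt {α : Type} {l : List α} {f : α → Bool} {x : α}
    (hx : x ∈ l) (hf : f x = false) : (l.filter f).length < l.length := by
  induction l with
  | nil => cases hx
  | cons a t ih =>
    rcases List.mem_cons.mp hx with rfl | hx'
    · simp only [List.filter_cons, hf, Bool.false_eq_true, List.length_cons]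
      exact Nat.lt_succ_of_le (List.length_filter_le _ t)
    · by_cases hfa : f a = true
      · simp only [List.filter_cons, hfa, if_true, List.length_cons]
        exact Nat.succ_lt_succ (ih hx')
      · simp only [List.filter_cons, hfa, List.length_cons]
        exact Nat.lt_succ_of_lt (ih hx')

theorem pv_pivot_mem (xs : List Int) (h : xs ≠ []) :
    PySem.List.pyGetD xs (PySem.Int.floordiv (xs.length : Int) 2) 0 ∈ xs := by
  have hl : 0 < xs.length := List.length_pos_iff.mpr h
  rw [PySem.Int.floordiv_eq_ediv_of_pos (by norm_num)]
  have h0 : 0 ≤ (xs.length : Int) / 2 := by omega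
  have h1 : (xs.length : Int) / 2 < (xs.length : Int) := by omega
  rw [PySem.List.pyGetD_eq_getElem _ _ h0 h1]
  exact List.getElem_mem _

-- small_sum(xs, m): sum of the m smallest elements of xs, by three-way partition around the middle element
def smallSum (xs : List Int) (m : Int) : Int :=
  if m ≤ 0 then 0
  else
    match xs with
    | [] => 0
    | a :: t =>
      let xs := a :: t
      let p := PySem.List.pyGetD xs (PySem.Int.floordiv (xs.length : Int) 2) 0
      let lt := xs.filter (fun x => decide (x < p))
      let eq := xs.filter (fun x => decide (x = p))
      let gt := xs.filter (fun x => decide (p < x))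
      if m ≤ (lt.length : Int) then smallSum lt m
      else if m ≤ (lt.length : Int) + (eq.length : Int) then lt.sum + p * (m - (lt.length : Int))
      else lt.sum + p * (eq.length : Int) + smallSum gt (m - (lt.length : Int) - (eq.length : Int))
  termination_by xs.length
  decreasing_by
  · exact pv_filter_length_lt (pv_pivot_mem (a :: t) (by simp)) (by simp)
  · exact pv_filter_length_lt (pv_pivot_mem (a :: t) (by simp)) (by simp)

def absDifference_alt (nums : List Int) (k : Int) : Int :=
  let n : Int := (nums.length : Int)
  let total := nums.sum
  total - smallSum nums (n - k) - smallSum nums k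

-- ===== PRECONDITION & SPEC =====
-- Pre_ excludes exactly the inputs where A raises IndexError: k > len(nums)
def Pre_absDifference (nums : List Int) (k : Int) : Prop := k ≤ (nums.length : Int)
instance (nums : List Int) (k : Int) : Decidable (Pre_absDifference nums k) := by unfold Pre_absDifference; infer_instance
def pvWitness_absDifference : List Int × Int := ([3, -1, 2, 5], 2)

def Spec_absDifference (nums : List Int) (k : Int) (out : Int) : Prop := out = absDifference_alt nums k
instance (nums : List Int) (k : Int) (out : Int) : Decidable (Spec_absDifference nums k out) := by unfold Spec_absDifference; infer_instance

-- ===== CLAIM (what is proved, stated in full; the proofs are below) =====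
def Claim_equal_absDifference : Prop := ∀ (nums : List Int) (k : Int), Dom_absDifference nums k → Pre_absDifference nums k → Spec_absDifference nums k (absDifference nums k)

-- ===== LEMMAS AND PROOFS =====

-- the sorted list decomposes around any pivot p into (sorted lt) ++ eq ++ (sorted gt)
theorem pv_sort_decomp (xs : List Int) (p : Int) :
    PySem.List.sorted xs (fun x => x) false
      = PySem.List.sorted (xs.filter (fun x => decide (x < p))) (fun x => x) false
        ++ xs.filter (fun x => decide (x = p))
        ++ PySem.List.sorted (xs.filter (fun x => decide (p < x))) (fun x => x) false := by
  have hperm : ((PySem.List.sorted (xs.filter (fun x => decide (x < p))) (fun x => x) false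
        ++ xs.filter (fun x => decide (x = p)))
        ++ PySem.List.sorted (xs.filter (fun x => decide (p < x))) (fun x => x) false).Perm xs := by
    have p1 := PySem.List.sorted_perm (xs.filter (fun x => decide (x < p))) (fun x => x) false
    have p3 := PySem.List.sorted_perm (xs.filter (fun x => decide (p < x))) (fun x => x) false
    refine ((p1.append (List.Perm.refl _)).append p3).trans ?_
    rw [List.perm_iff_count]
    intro b
    have hzero : ∀ f : Int → Bool, f b = false → (List.filter f xs).count b = 0 := by
      intro f hf; rw [List.count_eq_zero]; simp [List.mem_filter, hf]
    have hpos : ∀ f : Int → Bool, f b = true → (List.filter f xs).count b = xs.count b := by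
      intro f hf; exact List.count_filter (by simp [hf])
    simp only [List.count_append]
    rcases lt_trichotomy b p with hb | hb | hb
    · rw [hpos _ (by simpa using hb), hzero _ (by simp only [decide_eq_false_iff_not]; omega),
        hzero _ (by simp only [decide_eq_false_iff_not]; omega)]
      omega
    · subst hb
      rw [hzero _ (by simp), hpos _ (by simp), hzero _ (by simp)]
      omega
    · rw [hzero _ (by simp only [decide_eq_false_iff_not]; omega),
        hzero _ (by simp only [decide_eq_false_iff_not]; omega), hpos _ (by simpa using hb)]
      omega
  have hpw : List.Pairwise (fun a b : Int => a ≤ b)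
      ((PySem.List.sorted (xs.filter (fun x => decide (x < p))) (fun x => x) false
        ++ xs.filter (fun x => decide (x = p)))
        ++ PySem.List.sorted (xs.filter (fun x => decide (p < x))) (fun x => x) false) := by
    have hlt : ∀ a ∈ PySem.List.sorted (xs.filter (fun x => decide (x < p))) (fun x => x) false, a < p := by
      intro a ha
      have := (PySem.List.mem_sorted _ _ _ _).mp ha
      simpa using (List.mem_filter.mp this).2
    have heq : ∀ a ∈ xs.filter (fun x => decide (x = p)), a = p := by
      intro a ha; simpa using (List.mem_filter.mp ha).2
    have hgt : ∀ a ∈ PySem.List.sorted (xs.filter (fun x => decide (p < x))) (fun x => x) false, p < a := by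
      intro a ha
      have := (PySem.List.mem_sorted _ _ _ _).mp ha
      simpa using (List.mem_filter.mp this).2
    rw [List.pairwise_append, List.pairwise_append]
    refine ⟨⟨?_, ?_, ?_⟩, ?_, ?_⟩
    · simpa using PySem.List.sorted_pairwise (xs.filter (fun x => decide (x < p))) (fun x => x)
    · exact List.pairwise_of_forall_mem_list (fun a ha b hb => by rw [heq a ha, heq b hb])
    · intro a ha b hb; have := hlt a ha; have := heq b hb; omega
    · simpa using PySem.List.sorted_pairwise (xs.filter (fun x => decide (p < x))) (fun x => x)
    · intro a ha b hb
      rcases List.mem_append.mp ha with ha' | ha'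
      · have := hlt a ha'; have := hgt b hb; omega
      · have := heq a ha'; have := hgt b hb; omega
  exact PySem.List.sorted_id_eq_of_perm_of_pairwise xs _ hperm hpw

-- smallSum xs m is the sum of the first m elements of the sorted list (for every m)
theorem pv_smallSum_aux (N : Nat) : ∀ (xs : List Int), xs.length ≤ N → ∀ (m : Int),
    smallSum xs m = ((PySem.List.sorted xs (fun x => x) false).take m.toNat).sum := by
  induction N with
  | zero =>
    intro xs hlen m
    have hnil : xs = [] := List.length_eq_zero_iff.mp (Nat.le_zero.mp hlen)
    subst hnil
    have h0 : PySem.List.sorted ([] : List Int) (fun x => x) false = [] := rfl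
    rw [smallSum, h0]
    split <;> simp
  | succ N ih =>
    intro xs hlen m
    rcases xs with _ | ⟨a, t⟩
    · have h0 : PySem.List.sorted ([] : List Int) (fun x => x) false = [] := rfl
      rw [smallSum, h0]
      split <;> simp
    · rw [smallSum.eq_def]
      by_cases hm : m ≤ 0
      · rw [if_pos hm]
        simp [Int.toNat_of_nonpos hm]
      · rw [if_neg hm]
        simp only []
        set p := PySem.List.pyGetD (a :: t) (PySem.Int.floordiv ((a :: t).length : Int) 2) 0 with hp
        set lt := (a :: t).filter (fun x => decide (x < p)) with hltdef
        set eqs := (a :: t).filter (fun x => decide (x = p)) with heqdef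
        set gt := (a :: t).filter (fun x => decide (p < x)) with hgtdef
        have hpm : p ∈ (a :: t) := pv_pivot_mem (a :: t) (by simp)
        have hltlen : lt.length < (a :: t).length := pv_filter_length_lt hpm (by simp)
        have hgtlen : gt.length < (a :: t).length := pv_filter_length_lt hpm (by simp)
        have hsd := pv_sort_decomp (a :: t) p
        rw [← hltdef, ← heqdef, ← hgtdef] at hsd
        set slt := PySem.List.sorted lt (fun x => x) false with hslt
        set sgt := PySem.List.sorted gt (fun x => x) false with hsgt
        have hsltlen : slt.length = lt.length := PySem.List.length_sorted _ _ _
        have hsgtlen : sgt.length = gt.length := PySem.List.length_sorted _ _ _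
        have hsltsum : slt.sum = lt.sum := (PySem.List.sorted_perm _ _ _).sum_eq
        have heqall : ∀ x ∈ eqs, x = p := by
          intro x hx; simpa using (List.mem_filter.mp hx).2
        rw [hsd, List.take_append, List.take_append]
        rw [List.sum_append, List.sum_append]
        split_ifs with h1 h2
        · -- m ≤ lt.length : recurse on lt
          have e1 : m.toNat - slt.length = 0 := by omega
          have e2 : m.toNat - (slt ++ eqs).length = 0 := by
            simp only [List.length_append]; omega
          rw [e1, e2]
          simp only [List.take_zero, List.sum_nil, add_zero]
          have hrec : lt.length ≤ N := by omega
          rw [ih lt hrec m, ← hslt]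
        · -- lt.length < m ≤ lt.length + eqs.length
          have hmlt : lt.length < m.toNat := by omega
          have hmle : m.toNat - slt.length ≤ eqs.length := by omega
          rw [List.take_of_length_le (by omega : slt.length ≤ m.toNat)]
          have e2 : m.toNat - (slt ++ eqs).length = 0 := by
            simp only [List.length_append]; omega
          rw [e2]
          simp only [List.take_zero, List.sum_nil, add_zero]
          have htk : (eqs.take (m.toNat - slt.length)).sum
              = ((m.toNat - slt.length : Nat) : Int) * p := by
            rw [List.sum_eq_card_nsmul _ p (fun x hx => heqall x (List.mem_of_mem_take hx)),
              List.length_take, Nat.min_eq_left hmle, nsmul_eq_mul]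
          rw [htk, hsltsum]
          have hc : (((m.toNat - slt.length : Nat)) : Int) = m - (lt.length : Int) := by omega
          rw [hc]; ring
        · -- recurse on gt
          have hmgt : lt.length + eqs.length < m.toNat := by omega
          rw [List.take_of_length_le (by omega : slt.length ≤ m.toNat),
            List.take_of_length_le (by omega : eqs.length ≤ m.toNat - slt.length)]
          have heqsum : eqs.sum = ((eqs.length : Nat) : Int) * p := by
            rw [List.sum_eq_card_nsmul _ p heqall, nsmul_eq_mul]
          rw [ih gt (by omega) (m - (lt.length : Int) - (eqs.length : Int))]
          have hc : (m - (lt.length : Int) - (eqs.length : Int)).toNat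
              = m.toNat - (slt ++ eqs).length := by
            simp only [List.length_append]; omega
          rw [hc, heqsum, hsltsum]
          ring

theorem pv_smallSum_correct (xs : List Int) (m : Int) :
    smallSum xs m = ((PySem.List.sorted xs (fun x => x) false).take m.toNat).sum :=
  pv_smallSum_aux xs.length xs (le_refl _) m

theorem pv_B_eval (nums : List Int) (k : Int) :
    absDifference_alt nums k
      = nums.sum
        - ((PySem.List.sorted nums (fun x => x) false).take ((nums.length : Int) - k).toNat).sum
        - ((PySem.List.sorted nums (fun x => x) false).take k.toNat).sum := by
  simp only [absDifference_alt]
  rw [pv_smallSum_correct, pv_smallSum_correct]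

theorem pv_A_eval (nums : List Int) (k : Int) (hk0 : 0 ≤ k) (hkn : k ≤ (nums.length : Int)) :
    absDifference nums k
      = ((PySem.List.sorted nums (fun x => x) false).drop (nums.length - k.toNat)).sum
        - ((PySem.List.sorted nums (fun x => x) false).take k.toNat).sum := by
  obtain ⟨k', rfl⟩ : ∃ k' : Nat, k = (k' : Int) := ⟨k.toNat, (Int.toNat_of_nonneg hk0).symm⟩
  simp only [absDifference]
  set s := PySem.List.sorted nums (fun x => x) false with hs
  have hlen : s.length = nums.length := PySem.List.length_sorted _ _ _
  have hk' : k' ≤ s.length := by omega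
  rw [PySem.List.pyRange_zero_natCast, List.foldl_map]
  rw [PySem.List.foldl_prod_mk
    (f := fun (acc : Int) (j : Nat) => acc + PySem.List.pyGetD s (↑j) 0)
    (g := fun (acc : Int) (j : Nat) => acc + PySem.List.pyGetD s ((s.length : Int) - ↑j - 1) 0)]
  rw [PySem.List.foldl_add, PySem.List.foldl_add]
  have hmap1 : (List.range k').map (fun (j : Nat) => PySem.List.pyGetD s ((j : Int)) 0)
      = s.take k' := by
    apply List.ext_getElem
    · simp [List.length_take]; omega
    · intro i h1 h2
      simp only [List.getElem_map, List.getElem_range, List.getElem_take,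
        PySem.List.pyGetD_natCast]
      exact List.getD_eq_getElem _ _ (by simp at h1; omega)
  have hmap2 : (List.range k').map (fun (j : Nat) => PySem.List.pyGetD s ((s.length : Int) - (j : Int) - 1) 0)
      = s.reverse.take k' := by
    apply List.ext_getElem
    · simp [List.length_take]; omega
    · intro i h1 h2
      simp only [List.getElem_map, List.getElem_range, List.getElem_take] at *
      have hi : i < k' := by simpa using h1
      have hcast : ((s.length : Int) - (i : Int) - 1) = ((s.length - 1 - i : Nat) : Int) := by
        omega
      rw [hcast, PySem.List.pyGetD_natCast, List.getD_eq_getElem _ _ (by omega),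
        List.getElem_reverse]
  rw [hmap1, hmap2, List.take_reverse, List.sum_reverse]
  simp only [Int.toNat_natCast, hlen, zero_add]

-- ===== VERDICT (by name: the statement is the Claim_ definition above) =====
theorem absDifference_spec : Claim_equal_absDifference := by
  intro nums k _ hpre
  unfold Spec_absDifference
  unfold Pre_absDifference at hpre
  rcases Int.lt_or_le k 0 with hk0 | hk0
  · have hkle : k ≤ 0 := le_of_lt hk0
    have hA : absDifference nums k = 0 := by
      simp only [absDifference]
      have hr : PySem.List.pyRange 0 k = [] := by simp [PySem.List.pyRange, hkle]
      rw [hr]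
      simp
    rw [hA, pv_B_eval]
    have hperm : (PySem.List.sorted nums (fun x => x) false).sum = nums.sum :=
      (PySem.List.sorted_perm nums (fun x => x) false).sum_eq
    set s := PySem.List.sorted nums (fun x => x) false with hs
    have hlen : s.length = nums.length := PySem.List.length_sorted _ _ _
    have h1 : k.toNat = 0 := by omega
    have h2 : s.length ≤ ((nums.length : Int) - k).toNat := by omega
    rw [h1, List.take_of_length_le h2]
    simp only [List.take_zero, List.sum_nil, sub_zero]
    omega
  · rw [pv_A_eval nums k hk0 hpre, pv_B_eval]
    have hperm : (PySem.List.sorted nums (fun x => x) false).sum = nums.sum :=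
      (PySem.List.sorted_perm nums (fun x => x) false).sum_eq
    set s := PySem.List.sorted nums (fun x => x) false with hs
    have hlen : s.length = nums.length := PySem.List.length_sorted _ _ _
    have hnk : ((nums.length : Int) - k).toNat = nums.length - k.toNat := by omega
    rw [hnk]
    have hsplit : (s.take (nums.length - k.toNat)).sum + (s.drop (nums.length - k.toNat)).sum
        = s.sum := by rw [← List.sum_append, List.take_append_drop]
    omega
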